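-- pv_equiv track=rewrite | github.com/NGWi/deliberate-practice2 | binaryHashSort.py | expandTree2
-- ===== SOURCE A (Python) =====
-- def expandTree2(tree: set, layers: int) -> list:
--     """
--     We expand the layers with a BFS. The nodes are inherently ordered by 0, 1.
--     """
--     parent_layer = [""]
--     layer = 1
--     while True:
--         child_layer = []
--         for parent in parent_layer:
--             for child in (parent + "0", parent + "1"):
--                 if child in tree:
--                     child_layer.append(child)
--         if layer < layers:
--             parent_layer = child_layer
--         else:
--             return child_layer
--         layer += 1
-- ===== SOURCE B (Python) =====
-- def expandTree2(tree: set, layers: int) -> list: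
--     """Depth-first recursion over the trie instead of a BFS frontier list."""
--     def dfs(prefix, depth):
--         children = [prefix + b for b in ("0", "1") if prefix + b in tree]
--         if depth < layers:
--             out = []
--             for c in children:
--                 out.extend(dfs(c, depth + 1))
--             return out
--         return children
--     return dfs("", 1)
-- ===== Notes on version B (the rewrite author's own statement) =====
-- stated objective: alternative
-- what changed: Replaced the BFS with a maintained frontier list (looping once per layer, even after the frontier empties) by a depth-first recursion dfs(prefix, depth) that concatenates the results for the present children; DFS in 0-then-1 order yields the same lexicographic output, and it stops as soon as a branch dies instead of iterating all remaining layers.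
import Mathlib
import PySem

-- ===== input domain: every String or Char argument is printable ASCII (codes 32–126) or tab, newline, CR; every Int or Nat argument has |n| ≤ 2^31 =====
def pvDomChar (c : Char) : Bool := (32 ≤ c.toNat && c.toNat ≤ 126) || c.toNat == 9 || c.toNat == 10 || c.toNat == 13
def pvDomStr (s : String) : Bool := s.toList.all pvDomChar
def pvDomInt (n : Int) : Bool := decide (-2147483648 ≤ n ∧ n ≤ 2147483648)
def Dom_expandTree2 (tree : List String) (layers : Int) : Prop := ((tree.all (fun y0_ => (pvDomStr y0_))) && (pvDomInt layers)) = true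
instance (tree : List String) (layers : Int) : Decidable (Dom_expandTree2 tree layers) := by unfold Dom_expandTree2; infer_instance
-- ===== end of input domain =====

-- ===== PORT A =====
-- A: BFS with a maintained frontier list, looping (layers-1) extra times.
def pvChildAppendA (tree : List String) (acc : List String) (parent : String) : List String :=
  let acc := if tree.contains (parent ++ "0") then acc ++ [parent ++ "0"] else acc
  if tree.contains (parent ++ "1") then acc ++ [parent ++ "1"] else acc

def pvLoopA (tree : List String) : Nat → List String → List String
  | fuel, parentLayer =>
    let childLayer := parentLayer.foldl (pvChildAppendA tree) []
    match fuel with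
    | 0 => childLayer
    | f + 1 => pvLoopA tree f childLayer

def expandTree2 (tree : List String) (layers : Int) : List String :=
  pvLoopA tree (layers - 1).toNat [""]

-- ===== PORT B =====
-- B: depth-first recursion; remaining depth (layers - depth).toNat is the fuel.
def pvChildrenB (tree : List String) (pfx : String) : List String :=
  ["0", "1"].filterMap (fun b => if tree.contains (pfx ++ b) then some (pfx ++ b) else none)

def pvDfsB (tree : List String) : Nat → String → List String
  | 0, pfx => pvChildrenB tree pfx
  | f + 1, pfx => (pvChildrenB tree pfx).flatMap (pvDfsB tree f)

def expandTree2_alt (tree : List String) (layers : Int) : List String :=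
  pvDfsB tree (layers - 1).toNat ""

-- ===== PRECONDITION & SPEC =====
def Spec_expandTree2 (tree : List String) (layers : Int) (out : List String) : Prop := out = expandTree2_alt tree layers
instance (tree : List String) (layers : Int) (out : List String) : Decidable (Spec_expandTree2 tree layers out) := by unfold Spec_expandTree2; infer_instance

-- ===== CLAIM (what is proved, stated in full; the proofs are below) =====
def Claim_equal_expandTree2 : Prop := ∀ (tree : List String) (layers : Int), Dom_expandTree2 tree layers → Spec_expandTree2 tree layers (expandTree2 tree layers)

-- ===== LEMMAS AND PROOFS =====
theorem pvChildAppendA_eq (tree : List String) (acc : List String) (p : String) :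
    pvChildAppendA tree acc p = acc ++ pvChildrenB tree p := by
  simp only [pvChildAppendA, pvChildrenB, List.filterMap]
  split_ifs <;> simp

theorem foldl_childAppendA (tree : List String) (ps : List String) (acc : List String) :
    ps.foldl (pvChildAppendA tree) acc = acc ++ ps.flatMap (pvChildrenB tree) := by
  induction ps generalizing acc with
  | nil => simp
  | cons p ps ih =>
      rw [List.foldl_cons, ih, pvChildAppendA_eq, List.flatMap_cons, List.append_assoc]

theorem pvLoopA_eq_dfs (tree : List String) (fuel : Nat) (ps : List String) :
    pvLoopA tree fuel ps = ps.flatMap (pvDfsB tree fuel) := by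
  induction fuel generalizing ps with
  | zero =>
      show ps.foldl (pvChildAppendA tree) [] = _
      rw [foldl_childAppendA, List.nil_append]
      rfl
  | succ f ih =>
      show pvLoopA tree f (ps.foldl (pvChildAppendA tree) []) = _
      rw [ih, foldl_childAppendA, List.nil_append, List.flatMap_assoc]
      rfl

-- ===== VERDICT (by name: the statement is the Claim_ definition above) =====
theorem expandTree2_spec : Claim_equal_expandTree2 := by
  intro tree layers _
  unfold Spec_expandTree2 expandTree2 expandTree2_alt
  rw [pvLoopA_eq_dfs]
  simp
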